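-- pv_equiv track=rewrite | github.com/gwsshs22/dgl | python/dgl/omega/omega_apis.py | get_num_assigned_targets_per_gpu
-- ===== SOURCE A (Python) =====
-- def get_num_assigned_targets_per_gpu(num_machines, num_gpus_per_machine, num_targets):
--     num_total_gpus = num_machines * num_gpus_per_machine
--     num_targets_per_gpu = [0] * num_total_gpus
--     for machine_idx in range(num_machines):
--         num_targets_in_machine = num_targets // num_machines
--         if machine_idx < num_targets % num_machines:
--             num_targets_in_machine += 1
--
--         for gpu_idx in range(num_gpus_per_machine):
--             global_gpu_idx = machine_idx * num_gpus_per_machine + gpu_idx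
--             num_targets_per_gpu[global_gpu_idx] = num_targets_in_machine // num_gpus_per_machine
--             if gpu_idx < num_targets_in_machine % num_gpus_per_machine:
--                 num_targets_per_gpu[global_gpu_idx] += 1
--     return num_targets_per_gpu
-- ===== SOURCE B (Python) =====
-- def get_num_assigned_targets_per_gpu(num_machines, num_gpus_per_machine, num_targets):
--     if num_machines <= 0 or num_gpus_per_machine <= 0:
--         return []
--     G = num_gpus_per_machine
--     q, r = divmod(num_targets, num_machines)
--
--     # offset(k) = index of the first target owned by global GPU k (closed form);
--     # each GPU's share is the difference of consecutive offsets.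
--     def offset(k):
--         i, g = divmod(k, G)
--         c = q + (1 if i < r else 0)
--         return i * q + min(i, r) + g * (c // G) + min(g, c % G)
--
--     offs = [offset(k) for k in range(num_machines * G + 1)]
--     return [y - x for x, y in zip(offs, offs[1:])]
-- ===== Notes on version B (the rewrite author's own statement) =====
-- stated objective: alternative
-- what changed: B replaces A's nested machine/GPU distribution loops writing into a preallocated zero array with a closed-form prefix-offset function (the index of the first target owned by a given global GPU) and computes each GPU's share in one flat pass as the difference of consecutive offsets.
-- intended difference: When both num_machines and num_gpus_per_machine are negative (a nonsense input), A returns a zero-filled list of length num_machines*num_gpus_per_machine (an artefact of preallocating [0]*total while both loops run zero times); B returns [], matching what A itself returns whenever only one count is non-positive. — e.g. on get_num_assigned_targets_per_gpu(-1, -1, 0): A returns [0], B returns []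
import Mathlib
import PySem

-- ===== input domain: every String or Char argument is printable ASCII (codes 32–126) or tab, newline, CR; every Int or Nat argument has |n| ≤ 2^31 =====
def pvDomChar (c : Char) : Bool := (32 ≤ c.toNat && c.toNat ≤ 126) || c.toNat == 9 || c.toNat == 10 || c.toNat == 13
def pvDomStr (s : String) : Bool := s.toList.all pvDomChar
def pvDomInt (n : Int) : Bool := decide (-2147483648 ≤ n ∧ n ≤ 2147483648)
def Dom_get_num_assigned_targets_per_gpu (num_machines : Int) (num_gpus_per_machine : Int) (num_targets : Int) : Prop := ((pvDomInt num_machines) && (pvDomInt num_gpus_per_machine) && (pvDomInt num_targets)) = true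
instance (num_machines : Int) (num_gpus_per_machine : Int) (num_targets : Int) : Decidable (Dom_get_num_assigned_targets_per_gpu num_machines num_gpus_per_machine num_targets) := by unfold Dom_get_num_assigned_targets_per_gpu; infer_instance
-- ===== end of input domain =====

-- B computes each GPU's share as the difference of a closed-form prefix-offset function at
-- consecutive global GPU indices (one flat pass over range(M*G)), instead of A's nested
-- machine/GPU loops writing into a preallocated zero array; objective: alternative. On the
-- degenerate corner where both counts are negative (D_ below) A returns a zero-filled list of
-- length num_machines*num_gpus_per_machine while B returns the empty list.


-- ===== PORT A =====
def get_num_assigned_targets_per_gpu (num_machines : Int) (num_gpus_per_machine : Int) (num_targets : Int) : List Int :=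
  let num_total_gpus := num_machines * num_gpus_per_machine
  let num_targets_per_gpu : List Int := List.replicate num_total_gpus.toNat 0
  (PySem.List.pyRange 0 num_machines).foldl (fun acc machine_idx =>
    let num_targets_in_machine := PySem.Int.floordiv num_targets num_machines
    let num_targets_in_machine :=
      if machine_idx < PySem.Int.mod num_targets num_machines then num_targets_in_machine + 1
      else num_targets_in_machine
    (PySem.List.pyRange 0 num_gpus_per_machine).foldl (fun acc2 gpu_idx =>
      let global_gpu_idx := machine_idx * num_gpus_per_machine + gpu_idx
      let v := PySem.Int.floordiv num_targets_in_machine num_gpus_per_machine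
      let v := if gpu_idx < PySem.Int.mod num_targets_in_machine num_gpus_per_machine then v + 1 else v
      acc2.set global_gpu_idx.toNat v) acc) num_targets_per_gpu

-- ===== PORT B =====
-- offset(k) = global index of the first target owned by global GPU k (closed form)
def pvOffset (q r G k : Int) : Int :=
  let i := PySem.Int.floordiv k G
  let g := PySem.Int.mod k G
  let c := q + (if i < r then 1 else 0)
  i * q + min i r + g * (PySem.Int.floordiv c G) + min g (PySem.Int.mod c G)

def get_num_assigned_targets_per_gpu_alt (num_machines : Int) (num_gpus_per_machine : Int) (num_targets : Int) : List Int :=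
  if num_machines ≤ 0 ∨ num_gpus_per_machine ≤ 0 then []
  else
    let G := num_gpus_per_machine
    let q := PySem.Int.floordiv num_targets num_machines
    let r := PySem.Int.mod num_targets num_machines
    let offs := (PySem.List.pyRange 0 (num_machines * G + 1)).map (fun k => pvOffset q r G k)
    (offs.zip offs.tail).map (fun p => p.2 - p.1)

-- ===== PRECONDITION & SPEC =====
-- When both num_machines and num_gpus_per_machine are negative (a nonsense input), A returns a
-- zero-filled list of length num_machines*num_gpus_per_machine, an artefact of its preallocation;
-- B returns [], the value A itself returns whenever only one of the two counts is non-positive.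
def D_get_num_assigned_targets_per_gpu (num_machines : Int) (num_gpus_per_machine : Int) (num_targets : Int) : Prop :=
  num_machines < 0 ∧ num_gpus_per_machine < 0
instance (num_machines : Int) (num_gpus_per_machine : Int) (num_targets : Int) : Decidable (D_get_num_assigned_targets_per_gpu num_machines num_gpus_per_machine num_targets) := by unfold D_get_num_assigned_targets_per_gpu; infer_instance

def Spec_get_num_assigned_targets_per_gpu (num_machines : Int) (num_gpus_per_machine : Int) (num_targets : Int) (out : List Int) : Prop := ¬ D_get_num_assigned_targets_per_gpu num_machines num_gpus_per_machine num_targets → out = get_num_assigned_targets_per_gpu_alt num_machines num_gpus_per_machine num_targets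
instance (num_machines : Int) (num_gpus_per_machine : Int) (num_targets : Int) (out : List Int) : Decidable (Spec_get_num_assigned_targets_per_gpu num_machines num_gpus_per_machine num_targets out) := by unfold Spec_get_num_assigned_targets_per_gpu; infer_instance

def pvDiffWitness_get_num_assigned_targets_per_gpu : Int × Int × Int := (-1, -1, 0)
def pvDiffWitnessOut_get_num_assigned_targets_per_gpu : (List Int) × (List Int) := ([0], [])

-- ===== CLAIM (what is proved, stated in full; the proofs are below) =====
def Claim_unchanged_get_num_assigned_targets_per_gpu : Prop := ∀ (num_machines : Int) (num_gpus_per_machine : Int) (num_targets : Int), Dom_get_num_assigned_targets_per_gpu num_machines num_gpus_per_machine num_targets → Spec_get_num_assigned_targets_per_gpu num_machines num_gpus_per_machine num_targets (get_num_assigned_targets_per_gpu num_machines num_gpus_per_machine num_targets)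
def Claim_changed_get_num_assigned_targets_per_gpu : Prop := Dom_get_num_assigned_targets_per_gpu (pvDiffWitness_get_num_assigned_targets_per_gpu.1) (pvDiffWitness_get_num_assigned_targets_per_gpu.2.1) (pvDiffWitness_get_num_assigned_targets_per_gpu.2.2) ∧ D_get_num_assigned_targets_per_gpu (pvDiffWitness_get_num_assigned_targets_per_gpu.1) (pvDiffWitness_get_num_assigned_targets_per_gpu.2.1) (pvDiffWitness_get_num_assigned_targets_per_gpu.2.2) ∧ get_num_assigned_targets_per_gpu (pvDiffWitness_get_num_assigned_targets_per_gpu.1) (pvDiffWitness_get_num_assigned_targets_per_gpu.2.1) (pvDiffWitness_get_num_assigned_targets_per_gpu.2.2) = pvDiffWitnessOut_get_num_assigned_targets_per_gpu.1 ∧ get_num_assigned_targets_per_gpu_alt (pvDiffWitness_get_num_assigned_targets_per_gpu.1) (pvDiffWitness_get_num_assigned_targets_per_gpu.2.1) (pvDiffWitness_get_num_assigned_targets_per_gpu.2.2) = pvDiffWitnessOut_get_num_assigned_targets_per_gpu.2 ∧ pvDiffWitnessOut_get_num_assigned_targets_per_gpu.1 ≠ pvDiffWitnessOut_get_num_ass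igned_targets_per_gpu.2
def Claim_exact_get_num_assigned_targets_per_gpu : Prop := ∀ (num_machines : Int) (num_gpus_per_machine : Int) (num_targets : Int), Dom_get_num_assigned_targets_per_gpu num_machines num_gpus_per_machine num_targets → D_get_num_assigned_targets_per_gpu num_machines num_gpus_per_machine num_targets → get_num_assigned_targets_per_gpu num_machines num_gpus_per_machine num_targets ≠ get_num_assigned_targets_per_gpu_alt num_machines num_gpus_per_machine num_targets

-- ===== LEMMAS AND PROOFS =====

-- pyRange is empty when the upper bound is ≤ 0
lemma pyRange_zero_nonpos {b : Int} (hb : b ≤ 0) : PySem.List.pyRange 0 b = [] := by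
  apply List.eq_nil_iff_forall_not_mem.mpr
  intro x hx
  rw [PySem.List.mem_pyRange_one] at hx
  omega

-- writing w 0, …, w (G-1) by index into a zero block after pre fills the block with the map of w
lemma innerL (w : Int → Int) (G E : Nat) (pre : List Int) (off : Int) (hoff : off = (pre.length : Int)) :
    (PySem.List.pyRange 0 (G : Int)).foldl
      (fun acc g => acc.set (off + g).toNat (w g)) (pre ++ List.replicate (G + E) (0 : Int))
    = (pre ++ (PySem.List.pyRange 0 (G : Int)).map w) ++ List.replicate E (0 : Int) := by
  induction G generalizing E with
  | zero =>
      simp [pyRange_zero_nonpos (by omega : (0:Int) ≤ 0)]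
  | succ n ih =>
      have hcast : ((n + 1 : Nat) : Int) = (n : Int) + 1 := by push_cast; ring
      rw [hcast, PySem.List.pyRange_one_succ_right (by positivity), List.foldl_append]
      have hrep : List.replicate (n + 1 + E) (0 : Int) = List.replicate (n + (E + 1)) (0 : Int) := by
        congr 1; omega
      rw [hrep, ih (E + 1)]
      have hlenmap : ((PySem.List.pyRange 0 (n : Int)).map w).length = n := by
        rw [PySem.List.pyRange_zero_natCast]; simp
      have hidx : (off + (n : Int)).toNat = (pre ++ (PySem.List.pyRange 0 (n : Int)).map w).length := by
        rw [List.length_append, hlenmap]; omega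
      have hrep1 : List.replicate (E + 1) (0 : Int) = 0 :: List.replicate E (0 : Int) := by
        simp [List.replicate_succ]
      simp only [List.foldl_cons, List.foldl_nil, hrep1]
      rw [hidx, List.set_append_right _ _ (le_refl _)]
      simp [List.append_assoc]

-- length of the concatenation of the M blocks
lemma lenflat (w : Int → Int → Int) (G : Nat) (M : Nat) :
    ((PySem.List.pyRange 0 (M : Int)).flatMap
      (fun i => (PySem.List.pyRange 0 (G : Int)).map (w i))).length = M * G := by
  induction M with
  | zero => simp [pyRange_zero_nonpos (le_refl (0:Int))]
  | succ n ih =>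
      have hcast : ((n + 1 : Nat) : Int) = (n : Int) + 1 := by push_cast; ring
      rw [hcast, PySem.List.pyRange_one_succ_right (by positivity)]
      simp only [List.flatMap_append, List.length_append, ih]
      rw [PySem.List.pyRange_zero_natCast]
      simp [Nat.succ_mul]

-- the whole index-writing double loop equals the concatenation of the blocks
lemma outerL (w : Int → Int → Int) (G : Nat) (M : Nat) (E : Nat) :
    (PySem.List.pyRange 0 (M : Int)).foldl
      (fun acc i => (PySem.List.pyRange 0 (G : Int)).foldl
        (fun acc2 g => acc2.set (i * (G : Int) + g).toNat (w i g)) acc)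
      (List.replicate (M * G + E) (0 : Int))
    = (PySem.List.pyRange 0 (M : Int)).flatMap
        (fun i => (PySem.List.pyRange 0 (G : Int)).map (w i)) ++ List.replicate E (0 : Int) := by
  induction M generalizing E with
  | zero => simp [pyRange_zero_nonpos (le_refl (0:Int))]
  | succ n ih =>
      have hcast : ((n + 1 : Nat) : Int) = (n : Int) + 1 := by push_cast; ring
      rw [hcast, PySem.List.pyRange_one_succ_right (by positivity), List.foldl_append]
      have hrep : List.replicate ((n + 1) * G + E) (0 : Int)
          = List.replicate (n * G + (G + E)) (0 : Int) := by
        congr 1; rw [Nat.succ_mul]; omega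
      rw [hrep, ih (G + E)]
      simp only [List.foldl_cons, List.foldl_nil]
      rw [innerL (w (n : Int)) G E _ ((n : Int) * (G : Int))
        (by rw [lenflat w G n]; push_cast; ring)]
      rw [List.flatMap_append]
      simp [List.append_assoc]

-- one step of the offset function: the difference of consecutive offsets is the per-GPU share
lemma off_diff (q r G k : Int) (hG : 0 < G) :
    pvOffset q r G (k + 1) - pvOffset q r G k =
      (if PySem.Int.mod k G <
          PySem.Int.mod (q + (if PySem.Int.floordiv k G < r then 1 else 0)) G
        then PySem.Int.floordiv (q + (if PySem.Int.floordiv k G < r then 1 else 0)) G + 1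
        else PySem.Int.floordiv (q + (if PySem.Int.floordiv k G < r then 1 else 0)) G) := by
  simp only [pvOffset, PySem.Int.floordiv_eq_ediv_of_pos hG, PySem.Int.mod_eq_emod_of_pos hG]
  have hg0 : 0 ≤ k % G := Int.emod_nonneg k hG.ne'
  have hgG : k % G < G := Int.emod_lt_of_pos k hG
  have hkeq : G * (k / G) + k % G = k := Int.mul_ediv_add_emod k G
  by_cases hcase : k % G + 1 < G
  · have hrw : k + 1 = (k % G + 1) + G * (k / G) := by omega
    rw [hrw, Int.add_mul_ediv_left _ _ hG.ne', Int.ediv_eq_zero_of_lt (by omega) hcase,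
      Int.add_mul_emod_self_left, Int.emod_eq_of_lt (by omega) hcase, zero_add]
    set c := q + (if k / G < r then 1 else 0) with hcdef
    have hm0 : 0 ≤ c % G := Int.emod_nonneg c hG.ne'
    have hmG : c % G < G := Int.emod_lt_of_pos c hG
    have h1 : min (k % G + 1) (c % G) = if k % G < c % G then k % G + 1 else c % G := by
      split_ifs <;> omega
    have h2 : min (k % G) (c % G) = if k % G < c % G then k % G else c % G := by
      split_ifs <;> omega
    rw [h1, h2]
    split_ifs with h <;> ring
  · have hx : G * (k / G + 1) = G * (k / G) + G := by ring
    have hrw : k + 1 = 0 + G * (k / G + 1) := by omega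
    rw [hrw, Int.add_mul_ediv_left _ _ hG.ne', Int.add_mul_emod_self_left, Int.zero_ediv,
      Int.zero_emod, zero_add]
    have hm'0 : 0 ≤ (q + (if k / G + 1 < r then 1 else 0)) % G := Int.emod_nonneg _ hG.ne'
    have hg' : k % G = G - 1 := by omega
    by_cases hir : k / G < r
    · simp only [if_pos hir]
      have hm0 : 0 ≤ (q + 1) % G := Int.emod_nonneg _ hG.ne'
      have hmG : (q + 1) % G < G := Int.emod_lt_of_pos _ hG
      have hc : G * ((q + 1) / G) + (q + 1) % G = q + 1 := Int.mul_ediv_add_emod _ G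
      rw [min_eq_left hm'0, zero_mul, hg',
        if_neg (show ¬ G - 1 < (q + 1) % G by omega),
        min_eq_right (show (q + 1) % G ≤ G - 1 by omega),
        min_eq_left (show k / G + 1 ≤ r by omega),
        min_eq_left (show k / G ≤ r by omega)]
      linarith [hc, show (G - 1) * ((q + 1) / G) = G * ((q + 1) / G) - (q + 1) / G by ring]
    · rw [if_neg (show ¬ k / G + 1 < r by omega), if_neg hir, add_zero]
      have hm0 : 0 ≤ q % G := Int.emod_nonneg q hG.ne'
      have hmG : q % G < G := Int.emod_lt_of_pos q hG
      have hc : G * (q / G) + q % G = q := Int.mul_ediv_add_emod q G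
      rw [min_eq_left hm0, zero_mul, hg',
        if_neg (show ¬ G - 1 < q % G by omega),
        min_eq_right (show q % G ≤ G - 1 by omega),
        min_eq_right (show r ≤ k / G + 1 by omega),
        min_eq_right (show r ≤ k / G by omega)]
      linarith [hc, show (G - 1) * (q / G) = G * (q / G) - q / G by ring]

-- the offset difference at global index i*G+g is A's inner per-GPU value
lemma diff_at (q r G i g : Int) (hG : 0 < G) (hg0 : 0 ≤ g) (hgG : g < G) :
    pvOffset q r G (i * G + g + 1) - pvOffset q r G (i * G + g) =
      (if g < PySem.Int.mod (if i < r then q + 1 else q) G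
        then PySem.Int.floordiv (if i < r then q + 1 else q) G + 1
        else PySem.Int.floordiv (if i < r then q + 1 else q) G) := by
  rw [off_diff q r G (i * G + g) hG]
  have hdiv : PySem.Int.floordiv (i * G + g) G = i := by
    rw [PySem.Int.floordiv_eq_ediv_of_pos hG, show i * G + g = g + G * i by ring,
      Int.add_mul_ediv_left _ _ hG.ne', Int.ediv_eq_zero_of_lt hg0 hgG, zero_add]
  have hmod : PySem.Int.mod (i * G + g) G = g := by
    rw [PySem.Int.mod_eq_emod_of_pos hG, show i * G + g = g + G * i by ring,
      Int.add_mul_emod_self_left, Int.emod_eq_of_lt hg0 hgG]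
  rw [hdiv, hmod]
  have hce : q + (if i < r then 1 else 0) = (if i < r then q + 1 else q) := by
    split_ifs <;> ring
  rw [hce]

-- adjacent differences through a map taken pointwise
lemma adj_map (f : Int → Int) : ∀ (l : List Int) (x : Int),
    ((f x :: l.map f).zip (l.map f)).map (fun p => p.2 - p.1)
      = ((x :: l).zip l).map (fun p => f p.2 - f p.1) := by
  intro l
  induction l with
  | nil => intro x; simp
  | cons y t ih =>
      intro x
      simp only [List.map_cons, List.zip_cons_cons, List.map_cons, ih y]

-- zipping a mapped list with its tail, then differencing, is differencing the underlying pairs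
lemma zip_tail_map_diff (f : Int → Int) (l : List Int) :
    ((l.map f).zip (l.map f).tail).map (fun p => p.2 - p.1)
      = (l.zip l.tail).map (fun p => f p.2 - f p.1) := by
  cases l with
  | nil => simp
  | cons x t =>
      simp only [List.map_cons, List.tail_cons]
      exact adj_map f t x

-- adjacent pairs of a range are (k, k+1) for k in the range one shorter
lemma pyRange_adj (g : Int → Int → Int) : ∀ (n : Nat) (a : Int),
    ((PySem.List.pyRange a (a + (n : Int) + 1)).zip
        (PySem.List.pyRange a (a + (n : Int) + 1)).tail).map (fun p => g p.1 p.2)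
      = (PySem.List.pyRange a (a + (n : Int))).map (fun k => g k (k + 1)) := by
  intro n
  induction n with
  | zero =>
      intro a
      have h1 : PySem.List.pyRange a (a + ((0 : Nat) : Int) + 1) = [a] := by
        rw [show a + ((0 : Nat) : Int) + 1 = a + 1 by push_cast; ring,
          PySem.List.pyRange_one_cons (by omega), PySem.List.pyRange_one, show a + 1 - (a + 1) = 0 by ring]
        simp
      have h2 : PySem.List.pyRange a (a + ((0 : Nat) : Int)) = [] := by
        rw [show a + ((0 : Nat) : Int) = a by push_cast; ring, PySem.List.pyRange_one,
          show a - a = 0 by ring]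
        simp
      rw [h1, h2]
      simp
  | succ n ih =>
      intro a
      have hc1 : PySem.List.pyRange a (a + ((n + 1 : Nat) : Int) + 1)
          = a :: PySem.List.pyRange (a + 1) ((a + 1) + (n : Int) + 1) := by
        rw [PySem.List.pyRange_one_cons (by push_cast; omega)]
        congr 1
        push_cast
        ring
      have hc2 : PySem.List.pyRange a (a + ((n + 1 : Nat) : Int))
          = a :: PySem.List.pyRange (a + 1) ((a + 1) + (n : Int)) := by
        rw [PySem.List.pyRange_one_cons (by push_cast; omega)]
        congr 1
        push_cast
        ring
      have hc3 : PySem.List.pyRange (a + 1) ((a + 1) + (n : Int) + 1)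
          = (a + 1) :: PySem.List.pyRange (a + 2) ((a + 1) + (n : Int) + 1) := by
        rw [PySem.List.pyRange_one_cons (by omega)]
        congr 2
        ring
      rw [hc1, hc2]
      conv_lhs => rw [hc3]
      simp only [List.tail_cons, List.zip_cons_cons, List.map_cons]
      have ht : (PySem.List.pyRange (a + 1) ((a + 1) + (n : Int) + 1)).tail
          = PySem.List.pyRange (a + 2) ((a + 1) + (n : Int) + 1) := by
        rw [hc3, List.tail_cons]
      have h := ih (a + 1)
      rw [ht] at h
      rw [← hc3, h]

-- a map over the flat global range equals the concatenation of the per-machine blocks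
lemma map_range_eq_flatMap (f : Int → Int) (w : Int → Int → Int) (G M : Nat)
    (hw : ∀ i g : Nat, g < G → f ((i : Int) * G + g) = w i g) :
    (PySem.List.pyRange 0 ((M : Int) * (G : Int))).map f
      = (PySem.List.pyRange 0 (M : Int)).flatMap
          (fun i => (PySem.List.pyRange 0 (G : Int)).map (w i)) := by
  rw [show (M : Int) * (G : Int) = ((M * G : Nat) : Int) by push_cast; ring,
    PySem.List.pyRange_zero_natCast (M * G), PySem.List.pyRange_zero_natCast M]
  induction M with
  | zero => simp
  | succ n ih =>
      rw [List.range_succ, List.map_append, List.flatMap_append,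
        Nat.succ_mul, List.range_add, List.map_append, List.map_append, ← ih]
      congr 1
      simp only [List.map_map, List.map_cons, List.map_nil, List.flatMap_cons,
        List.flatMap_nil, List.append_nil, PySem.List.pyRange_zero_natCast G]
      apply List.map_congr_left
      intro g hg
      have h := hw n g (List.mem_range.mp hg)
      simp only [Function.comp]
      push_cast
      exact h

theorem get_num_assigned_targets_per_gpu_spec : Claim_unchanged_get_num_assigned_targets_per_gpu := by
  intro nm ng nt _ hD
  show get_num_assigned_targets_per_gpu nm ng nt = get_num_assigned_targets_per_gpu_alt nm ng nt
  by_cases hm : 0 < nm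
  · by_cases hg : 0 < ng
    · -- main case: both counts positive
      obtain ⟨M, rfl⟩ : ∃ M : Nat, nm = (M : Int) := ⟨nm.toNat, (Int.toNat_of_nonneg hm.le).symm⟩
      obtain ⟨G, rfl⟩ : ∃ G : Nat, ng = (G : Int) := ⟨ng.toNat, (Int.toNat_of_nonneg hg.le).symm⟩
      have htot : ((M : Int) * (G : Int)).toNat = M * G + 0 := by
        rw [← Nat.cast_mul, Int.toNat_natCast]
        omega
      have hmain := outerL (fun i g =>
        if g < PySem.Int.mod (if i < PySem.Int.mod nt (M : Int) then
              PySem.Int.floordiv nt (M : Int) + 1 else PySem.Int.floordiv nt (M : Int)) (G : Int)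
        then PySem.Int.floordiv (if i < PySem.Int.mod nt (M : Int) then
              PySem.Int.floordiv nt (M : Int) + 1 else PySem.Int.floordiv nt (M : Int)) (G : Int) + 1
        else PySem.Int.floordiv (if i < PySem.Int.mod nt (M : Int) then
              PySem.Int.floordiv nt (M : Int) + 1 else PySem.Int.floordiv nt (M : Int)) (G : Int)) G M 0
      have hflat := map_range_eq_flatMap
        (fun k => pvOffset (PySem.Int.floordiv nt (M : Int)) (PySem.Int.mod nt (M : Int)) (G : Int) (k + 1)
          - pvOffset (PySem.Int.floordiv nt (M : Int)) (PySem.Int.mod nt (M : Int)) (G : Int) k)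
        (fun i g =>
          if g < PySem.Int.mod (if i < PySem.Int.mod nt (M : Int) then
                PySem.Int.floordiv nt (M : Int) + 1 else PySem.Int.floordiv nt (M : Int)) (G : Int)
          then PySem.Int.floordiv (if i < PySem.Int.mod nt (M : Int) then
                PySem.Int.floordiv nt (M : Int) + 1 else PySem.Int.floordiv nt (M : Int)) (G : Int) + 1
          else PySem.Int.floordiv (if i < PySem.Int.mod nt (M : Int) then
                PySem.Int.floordiv nt (M : Int) + 1 else PySem.Int.floordiv nt (M : Int)) (G : Int)) G M
        (fun i g hgG => diff_at _ _ _ _ _ (by exact_mod_cast hg)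
          (Int.natCast_nonneg g) (by exact_mod_cast hgG))
      have hBmap :
          ((((PySem.List.pyRange 0 ((M : Int) * (G : Int) + 1)).map
              (fun k => pvOffset (PySem.Int.floordiv nt (M : Int)) (PySem.Int.mod nt (M : Int)) (G : Int) k)).zip
            ((PySem.List.pyRange 0 ((M : Int) * (G : Int) + 1)).map
              (fun k => pvOffset (PySem.Int.floordiv nt (M : Int)) (PySem.Int.mod nt (M : Int)) (G : Int) k)).tail).map
            (fun p => p.2 - p.1))
          = (PySem.List.pyRange 0 ((M : Int) * (G : Int))).map
              (fun k => pvOffset (PySem.Int.floordiv nt (M : Int)) (PySem.Int.mod nt (M : Int)) (G : Int) (k + 1)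
                - pvOffset (PySem.Int.floordiv nt (M : Int)) (PySem.Int.mod nt (M : Int)) (G : Int) k) := by
        rw [zip_tail_map_diff]
        have h := pyRange_adj
          (fun x y => pvOffset (PySem.Int.floordiv nt (M : Int)) (PySem.Int.mod nt (M : Int)) (G : Int) y
            - pvOffset (PySem.Int.floordiv nt (M : Int)) (PySem.Int.mod nt (M : Int)) (G : Int) x) (M * G) 0
        rw [show (0 : Int) + ((M * G : Nat) : Int) + 1 = (M : Int) * (G : Int) + 1 by push_cast; ring,
          show (0 : Int) + ((M * G : Nat) : Int) = (M : Int) * (G : Int) by push_cast; ring] at h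
        exact h
      have hcond : ¬ ((M : Int) ≤ 0 ∨ (G : Int) ≤ 0) := by
        rintro (h | h) <;> omega
      simp only [get_num_assigned_targets_per_gpu, get_num_assigned_targets_per_gpu_alt,
        if_neg hcond, htot, hmain, hBmap, hflat, List.replicate_zero, List.append_nil]
    · -- num_gpus_per_machine ≤ 0: both sides are []
      have hg' : ng ≤ 0 := not_lt.mp hg
      have h1 : (nm * ng).toNat = 0 :=
        Int.toNat_of_nonpos (mul_nonpos_iff.mpr (Or.inl ⟨hm.le, hg'⟩))
      simp only [get_num_assigned_targets_per_gpu, get_num_assigned_targets_per_gpu_alt,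
        if_pos (Or.inr hg'), pyRange_zero_nonpos hg', List.foldl_nil, h1,
        List.replicate_zero, List.foldl_fixed]
  · -- num_machines ≤ 0 (and not both negative): both sides are []
    have hm' : nm ≤ 0 := not_lt.mp hm
    simp only [get_num_assigned_targets_per_gpu, get_num_assigned_targets_per_gpu_alt,
      if_pos (Or.inl hm'), pyRange_zero_nonpos hm', List.foldl_nil]
    have h1 : nm * ng ≤ 0 := by
      rcases hm'.lt_or_eq with h | h
      · have hng : 0 ≤ ng := by
          by_contra hc
          exact hD ⟨h, by omega⟩
        exact mul_nonpos_iff.mpr (Or.inr ⟨hm', hng⟩)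
      · rw [h, zero_mul]
    simp [Int.toNat_of_nonpos h1]

theorem get_num_assigned_targets_per_gpu_changed : Claim_changed_get_num_assigned_targets_per_gpu := by
  unfold Claim_changed_get_num_assigned_targets_per_gpu; decide

theorem get_num_assigned_targets_per_gpu_tight : Claim_exact_get_num_assigned_targets_per_gpu := by
  intro nm ng nt _ hD
  obtain ⟨hm, hg⟩ := hD
  have hpos : 0 < nm * ng := mul_pos_of_neg_of_neg hm hg
  simp only [get_num_assigned_targets_per_gpu, get_num_assigned_targets_per_gpu_alt,
    pyRange_zero_nonpos hm.le, List.foldl_nil, if_pos (Or.inl hm.le)]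
  intro h
  have := congrArg List.length h
  simp at this
  omega
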